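-- pv_equiv track=rewrite | github.com/artvepa80/OMEGA | modules/aprendizaje_omega_v3.py | _max_cluster_size
-- ===== SOURCE A (Python) =====
-- from typing import List, Dict, Any, Tuple, Optional, Set, Union
--
-- def _max_cluster_size(sorted_combo: List[int], threshold: int = 5) -> int:
--     """Encuentra el cluster más grande"""
--     if not sorted_combo:
--         return 0
--
--     max_size = 1
--     current_size = 1
--
--     for i in range(1, len(sorted_combo)):
--         if sorted_combo[i] - sorted_combo[i-1] <= threshold:
--             current_size += 1
--             max_size = max(max_size, current_size)
--         else:
--             current_size = 1
--
--     return max_size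
-- ===== SOURCE B (Python) =====
-- def _max_cluster_size(sorted_combo, threshold=5):
--     """Partition into clusters of near-consecutive values, then take the largest size."""
--     clusters = []
--     for x in sorted_combo:
--         if clusters and x - clusters[-1][-1] <= threshold:
--             clusters[-1].append(x)
--         else:
--             clusters.append([x])
--     return max(map(len, clusters), default=0)
-- ===== Notes on version B (the rewrite author's own statement) =====
-- stated objective: alternative
-- what changed: Replaces A's fused running-counter/max loop by an explicit partition of the list into clusters (sublists split where the gap exceeds the threshold) followed by a separate max-over-lengths reduction.
import Mathlib
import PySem

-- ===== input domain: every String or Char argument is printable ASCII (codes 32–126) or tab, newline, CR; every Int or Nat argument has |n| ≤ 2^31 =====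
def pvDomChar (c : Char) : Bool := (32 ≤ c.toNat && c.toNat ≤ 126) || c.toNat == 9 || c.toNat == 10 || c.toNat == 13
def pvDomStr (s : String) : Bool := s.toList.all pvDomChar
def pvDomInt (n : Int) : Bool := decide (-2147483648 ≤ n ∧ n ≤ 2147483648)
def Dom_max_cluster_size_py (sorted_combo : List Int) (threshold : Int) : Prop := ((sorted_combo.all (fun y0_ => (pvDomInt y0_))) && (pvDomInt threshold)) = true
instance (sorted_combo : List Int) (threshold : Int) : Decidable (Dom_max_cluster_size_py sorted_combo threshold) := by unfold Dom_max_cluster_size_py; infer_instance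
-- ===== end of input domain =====

-- B replaces A's fused running-counter loop by an explicit partition into clusters followed by a max-over-lengths reduction (alternative decomposition, same cost).


-- ===== PORT A =====
-- A's loop over i = 1 .. n-1, reading sorted_combo[i] and sorted_combo[i-1], ported as the
-- obvious structural recursion carrying (prev = sorted_combo[i-1], max_size, current_size).
def pvALoop (threshold prev max_size current_size : Int) : List Int → Int
  | [] => max_size
  | x :: rest =>
    if x - prev ≤ threshold then
      pvALoop threshold x (max max_size (current_size + 1)) (current_size + 1) rest
    else
      pvALoop threshold x max_size 1 rest

def max_cluster_size_py (sorted_combo : List Int) (threshold : Int) : Int :=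
  match sorted_combo with
  | [] => 0
  | x :: rest => pvALoop threshold x 1 1 rest

-- ===== PORT B =====
-- Source B's partition loop: extend the last cluster when the gap to its last element is ≤ threshold,
-- else open a new one.  The Lean accumulator keeps the cluster list AND each cluster reversed
-- (most recent first), so Python's clusters[-1][-1] is the head of the head and Python's
-- append is a cons; the returned cluster LENGTHS are identical.
def pvBStep (threshold : Int) (clusters : List (List Int)) (x : Int) : List (List Int) :=
  match clusters with
  | (y :: ys) :: rest =>
      if x - y ≤ threshold then (x :: y :: ys) :: rest
      else [x] :: (y :: ys) :: rest
  | _ => [x] :: clusters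

def max_cluster_size_py_alt (sorted_combo : List Int) (threshold : Int) : Int :=
  ((sorted_combo.foldl (pvBStep threshold) []).map (fun c => (c.length : Int))).foldl max 0

-- ===== PRECONDITION & SPEC =====
def Spec_max_cluster_size_py (sorted_combo : List Int) (threshold : Int) (out : Int) : Prop := out = max_cluster_size_py_alt sorted_combo threshold
instance (sorted_combo : List Int) (threshold : Int) (out : Int) : Decidable (Spec_max_cluster_size_py sorted_combo threshold out) := by unfold Spec_max_cluster_size_py; infer_instance

-- ===== CLAIM (what is proved, stated in full; the proofs are below) =====
def Claim_equal_max_cluster_size_py : Prop := ∀ (sorted_combo : List Int) (threshold : Int), Dom_max_cluster_size_py sorted_combo threshold → Spec_max_cluster_size_py sorted_combo threshold (max_cluster_size_py sorted_combo threshold)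

-- ===== LEMMAS AND PROOFS =====

lemma foldl_max_pull (l : List Int) : ∀ a b : Int, l.foldl max (a ⊔ b) = a ⊔ l.foldl max b := by
  induction l with
  | nil => intro a b; simp
  | cons x l ih =>
    intro a b
    simp only [List.foldl_cons, max_assoc]
    exact ih a (b ⊔ x)

def pvMaxLens (cls : List (List Int)) : Int := (cls.map (fun c => (c.length : Int))).foldl max 0

lemma maxLens_cons (d : List Int) (cls : List (List Int)) :
    pvMaxLens (d :: cls) = (d.length : Int) ⊔ pvMaxLens cls := by
  simp only [pvMaxLens, List.map_cons, List.foldl_cons]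
  rw [max_comm (0 : Int), foldl_max_pull]

-- loop invariant: A's state (prev, max_size, current_size) describes B's accumulator
-- cur :: done — prev is the most recent element (head of cur), current_size = |cur|,
-- max_size = max of all cluster lengths so far
lemma pvLoop_eq (t : Int) : ∀ (rest : List Int) (prev ms cs : Int) (cur' : List Int)
    (done : List (List Int)),
    cs = ((prev :: cur').length : Int) →
    ms = pvMaxLens ((prev :: cur') :: done) →
    pvALoop t prev ms cs rest =
      pvMaxLens (List.foldl (pvBStep t) ((prev :: cur') :: done) rest) := by
  intro rest
  induction rest with
  | nil => intro prev ms cs cur' done hcs hms; simpa [pvALoop] using hms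
  | cons x rest' ih =>
    intro prev ms cs cur' done hcs hms
    have hmd := maxLens_cons (prev :: cur') done
    simp only [List.foldl_cons, pvALoop, pvBStep]
    by_cases hle : x - prev ≤ t
    · rw [if_pos hle, if_pos hle]
      apply ih x _ _ (prev :: cur') done
      · simp only [List.length_cons] at hcs ⊢
        push_cast at hcs ⊢
        omega
      · rw [maxLens_cons, hms, hmd]
        simp only [List.length_cons] at hcs ⊢
        push_cast at hcs ⊢
        omega
    · rw [if_neg hle, if_neg hle]
      apply ih x _ _ [] ((prev :: cur') :: done)
      · simp
      · rw [maxLens_cons, hms, hmd]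
        simp only [List.length_cons, List.length_nil]
        push_cast
        omega

-- ===== VERDICT (by name: the statement is the Claim_ definition above) =====
theorem max_cluster_size_py_spec : Claim_equal_max_cluster_size_py := by
  intro sorted_combo threshold _
  show max_cluster_size_py sorted_combo threshold = max_cluster_size_py_alt sorted_combo threshold
  match sorted_combo with
  | [] => rfl
  | x :: rest =>
    show pvALoop threshold x 1 1 rest = _
    rw [pvLoop_eq threshold rest x 1 1 [] [] (by simp) (by simp [pvMaxLens])]
    simp [max_cluster_size_py_alt, pvMaxLens, List.foldl_cons, pvBStep]
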